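-- pv_equiv track=rewrite | github.com/matvi/CodeChallanges | intersection.py | solution
-- ===== SOURCE A (Python) =====
-- def solution(array):
--     tuple_list = []
--     #first create a list of tuples, each tuple represents the begin and the end of the new array
--     for i in range(len(array)):
--         figure = (i-array[i], i+array[i])
--         tuple_list.append(figure)
--     #order the tuple (#depending on the algorithm this sorting can have a O(nlogn)) time complexity
--     tuple_list.sort()
--     intersections = 0
--
--     #this algorithm to find th eintersections will have an O(n log n) time complexity
--     for i in range(len(tuple_list)-1):
--         for j in range(i+1,len(tuple_list)):
--             intersections += checkIntersection(tuple_list[i], tuple_list[j])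
--     return intersections
--
-- def checkIntersection(t, t2):
--     if ( t2[0] >= t[0] and t2[0] <= t[1] ):
--         return 1
--     return 0
-- ===== SOURCE B (Python) =====
-- def solution(array):
--     # Sort the derived intervals once; then for each interval, one binary search on the
--     # sorted start list counts the later intervals whose start falls inside it.
--     ivals = sorted((i - v, i + v) for i, v in enumerate(array))
--     starts = [s for s, _ in ivals]
--     total = 0
--     for i in range(len(ivals)):
--         c = _bisect_right(starts, ivals[i][1]) - (i + 1)
--         if c > 0:
--             total += c
--     return total
--
-- def _bisect_right(xs, x):
--     lo = 0
--     hi = len(xs)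
--     while lo < hi:
--         mid = (lo + hi) // 2
--         if x < xs[mid]:
--             hi = mid
--         else:
--             lo = mid + 1
--     return lo
-- ===== Notes on version B (the rewrite author's own statement) =====
-- stated objective: faster
-- what changed: Replaces A's quadratic all-pairs scan over the sorted intervals by sorting once and doing one binary search per interval on the sorted start list (count of starts <= end, minus the i+1 earlier positions, clamped at 0).
import Mathlib
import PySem

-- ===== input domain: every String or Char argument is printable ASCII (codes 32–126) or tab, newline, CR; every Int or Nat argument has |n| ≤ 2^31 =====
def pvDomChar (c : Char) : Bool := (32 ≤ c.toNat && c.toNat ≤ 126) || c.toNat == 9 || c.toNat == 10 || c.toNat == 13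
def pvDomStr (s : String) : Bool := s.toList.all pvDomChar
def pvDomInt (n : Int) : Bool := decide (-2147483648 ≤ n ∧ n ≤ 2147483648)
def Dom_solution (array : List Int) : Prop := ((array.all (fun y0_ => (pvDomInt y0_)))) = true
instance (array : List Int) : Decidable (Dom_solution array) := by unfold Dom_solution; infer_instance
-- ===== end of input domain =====

-- B sorts the derived intervals once and replaces A's quadratic all-pairs inner scan by one
-- binary search per interval on the sorted start list (measured asymptotically faster).


-- ===== PORT A =====
def checkIntersection (t t2 : Int × Int) : Int :=
  if t2.1 ≥ t.1 ∧ t2.1 ≤ t.2 then 1 else 0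

def solution (array : List Int) : Int :=
  let tuple_list := (PySem.List.pyRange 0 (array.length : Int)).foldl
      (fun acc i => acc ++ [(i - PySem.List.pyGetD array i 0, i + PySem.List.pyGetD array i 0)]) []
  let tl := PySem.List.sorted2 tuple_list (fun t => t.1) (fun t => t.2)
  (PySem.List.pyRange 0 ((tl.length : Int) - 1)).foldl (fun acc i =>
    (PySem.List.pyRange (i + 1) (tl.length : Int)).foldl (fun acc2 j =>
      acc2 + checkIntersection (PySem.List.pyGetD tl i (0, 0)) (PySem.List.pyGetD tl j (0, 0))) acc) 0

-- ===== PORT B =====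
-- the while-loop of Source B's _bisect_right (lo/hi are the loop state)
def bisectGo (xs : List Int) (x lo hi : Int) : Int :=
  if h : lo < hi then
    let mid := PySem.Int.floordiv (lo + hi) 2
    if x < PySem.List.pyGetD xs mid 0 then bisectGo xs x lo mid
    else bisectGo xs x (mid + 1) hi
  else lo
termination_by (hi - lo).toNat
decreasing_by
  · have hlt : PySem.Int.floordiv (lo + hi) 2 < hi :=
      (PySem.Int.floordiv_lt_iff_lt_mul (by norm_num)).2 (by omega)
    simp only [mid] at *; omega
  · have hb := PySem.Int.floordiv_two_mid_bounds (le_of_lt h)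
    simp only [mid] at *; omega

def bisectRightB (xs : List Int) (x : Int) : Int := bisectGo xs x 0 (xs.length : Int)

def solution_alt (array : List Int) : Int :=
  let ivals := PySem.List.sorted2
      ((PySem.List.enumerate array).map (fun p => (p.1 - p.2, p.1 + p.2)))
      (fun t => t.1) (fun t => t.2)
  let starts := ivals.map (fun p => p.1)
  (PySem.List.pyRange 0 (ivals.length : Int)).foldl (fun total i =>
    let c := bisectRightB starts (PySem.List.pyGetD ivals i (0, 0)).2 - (i + 1)
    if c > 0 then total + c else total) 0

-- ===== PRECONDITION & SPEC =====
def Spec_solution (array : List Int) (out : Int) : Prop := out = solution_alt array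
instance (array : List Int) (out : Int) : Decidable (Spec_solution array out) := by unfold Spec_solution; infer_instance

-- ===== CLAIM (what is proved, stated in full; the proofs are below) =====
def Claim_equal_solution : Prop := ∀ (array : List Int), Dom_solution array → Spec_solution array (solution array)

-- ===== LEMMAS AND PROOFS =====

lemma pyRange_one_eq (a b : Int) :
    PySem.List.pyRange a b = (List.range (b - a).toNat).map (fun k : Nat => a + (k : Int)) := by
  unfold PySem.List.pyRange
  norm_num
  split_ifs with h
  · rfl
  · have : (b - a).toNat = 0 := by omega
    simp [this]

lemma drop_eq_map_range {α : Type} (S : List α) (d : α) (m : Nat) :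
    S.drop m = (List.range (S.length - m)).map (fun l => S.getD (m + l) d) := by
  apply List.ext_getElem
  · simp
  · intro i h1 h2
    have hi : i < S.length - m := by simpa using h2
    simp [List.getElem_drop, List.getElem?_eq_getElem (show m + i < S.length by omega)]

lemma enumerate_eq {α : Type} (d : α) :
    ∀ (xs : List α) (s : Int), PySem.List.enumerate xs s
      = (List.range xs.length).map (fun k : Nat => (s + (k : Int), xs.getD k d))
  | [], s => by simp [PySem.List.enumerate]
  | x :: t, s => by
    rw [PySem.List.enumerate, enumerate_eq d t (s + 1)]
    simp [List.range_succ_eq_map, List.map_map, Function.comp_def]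
    intro a _
    omega

lemma sum_map_ite_prop {α : Type} (p : α → Prop) [DecidablePred p] (xs : List α) :
    (xs.map (fun x => if p x then (1 : Int) else 0)).sum
      = (xs.countP (fun x => decide (p x)) : Int) := by
  rw [show (fun x => if p x then (1 : Int) else 0)
      = (fun x => if (fun x => decide (p x)) x = true then (1 : Int) else 0) by
    funext x; simp]
  exact PySem.List.sum_map_ite_one_zero _ xs

lemma pairwise_insertBy (x : Int × Int) (ys : List (Int × Int))
    (before : Int × Int → Int × Int → Bool)
    (hb1 : ∀ a b, before a b = true → a.1 ≤ b.1)
    (hb2 : ∀ a b, before a b = false → b.1 ≤ a.1)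
    (hp : ys.Pairwise (fun a b => a.1 ≤ b.1)) :
    (PySem.List.insertBy before x ys).Pairwise (fun a b => a.1 ≤ b.1) := by
  induction ys with
  | nil => simp [PySem.List.insertBy]
  | cons y ys ih =>
    rw [PySem.List.insertBy]
    have hy := (List.pairwise_cons.1 hp).1
    have hys := (List.pairwise_cons.1 hp).2
    by_cases hxy : before x y = true
    · simp only [hxy, if_pos]
      refine List.Pairwise.cons ?_ (List.Pairwise.cons hy hys)
      intro z hz
      rcases List.mem_cons.1 hz with rfl | hz
      · exact hb1 _ _ hxy
      · exact le_trans (hb1 _ _ hxy) (hy z hz)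
    · rw [if_neg hxy]
      refine List.Pairwise.cons ?_ (ih hys)
      intro z hz
      rcases (PySem.List.mem_insertBy before x z ys).1 hz with rfl | hz
      · exact hb2 _ _ (by simpa using hxy)
      · exact hy z hz

lemma sorted2_pairwise_fst (M : List (Int × Int)) :
    (PySem.List.sorted2 M (fun t => t.1) (fun t => t.2)).Pairwise (fun a b => a.1 ≤ b.1) := by
  show (List.foldl (fun acc x => PySem.List.insertBy _ x acc) [] M).Pairwise _
  generalize hacc : ([] : List (Int × Int)) = acc
  have hp : acc.Pairwise (fun a b : Int × Int => a.1 ≤ b.1) := by rw [← hacc]; simp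
  clear hacc
  induction M generalizing acc with
  | nil => simpa using hp
  | cons m M ih =>
    simp only [List.foldl_cons]
    refine ih _ (pairwise_insertBy _ _ _ ?_ ?_ hp)
    · intro a b h
      simp only [if_neg (by decide : ¬ (false = true)), Bool.or_eq_true, decide_eq_true_eq,
        Bool.and_eq_true, Bool.not_eq_true', decide_eq_false_iff_not] at h
      omega
    · intro a b h
      simp only [if_neg (by decide : ¬ (false = true)), Bool.or_eq_false_iff,
        decide_eq_false_iff_not, Bool.and_eq_false_iff] at h
      omega

lemma countP_eq_of_pivot {α : Type} (xs : List α) (P : α → Bool) (r : Nat)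
    (hr : r ≤ xs.length)
    (h1 : ∀ (k : Nat) (h : k < xs.length), k < r → P xs[k] = true)
    (h2 : ∀ (k : Nat) (h : k < xs.length), r ≤ k → P xs[k] = false) :
    xs.countP P = r := by
  have hsplit := List.take_append_drop r xs
  have := List.countP_append (p := P) (l₁ := xs.take r) (l₂ := xs.drop r)
  rw [hsplit] at this
  have htake : (xs.take r).countP P = r := by
    rw [List.countP_eq_length.2, List.length_take]
    · omega
    · intro a ha
      rcases List.mem_iff_getElem.1 ha with ⟨i, hi, rfl⟩
      have hi' : i < xs.length := by simp at hi; omega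
      rw [List.getElem_take]
      exact h1 i hi' (by simp at hi; omega)
  have hdrop : (xs.drop r).countP P = 0 := by
    rw [List.countP_eq_zero.2]
    intro a ha
    rcases List.mem_iff_getElem.1 ha with ⟨i, hi, rfl⟩
    have hi' : r + i < xs.length := by simp at hi; omega
    rw [List.getElem_drop]
    simp [h2 (r + i) hi' (by omega)]
  omega

lemma pairwise_getElem_le (xs : List Int) (hs : xs.Pairwise (· ≤ ·))
    {i j : Nat} (hij : i ≤ j) (hj : j < xs.length) :
    xs[i]'(by omega) ≤ xs[j] := by
  rcases Nat.lt_or_ge i j with h | h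
  · exact List.pairwise_iff_getElem.1 hs i j (by omega) hj h
  · have : i = j := by omega
    subst this; rfl

lemma bisectGo_eq_aux (xs : List Int) (hs : xs.Pairwise (· ≤ ·)) (x : Int) :
    ∀ (N : Nat) (lo hi : Int), (hi - lo).toNat ≤ N → 0 ≤ lo → lo ≤ hi → hi ≤ xs.length →
      (∀ (k : Nat) (h : k < xs.length), (k : Int) < lo → xs[k] ≤ x) →
      (∀ (k : Nat) (h : k < xs.length), hi ≤ (k : Int) → x < xs[k]) →
      bisectGo xs x lo hi = (xs.countP (fun s => decide (s ≤ x)) : Int) := by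
  intro N
  induction N with
  | zero =>
    intro lo hi hN h0 hlh hhi hlow hhigh
    have : lo = hi := by omega
    subst this
    rw [bisectGo, dif_neg (by omega)]
    have : xs.countP (fun s => decide (s ≤ x)) = lo.toNat := by
      apply countP_eq_of_pivot _ _ _ (by omega)
      · intro k h hk
        simp only [decide_eq_true_eq]
        exact hlow k h (by omega)
      · intro k h hk
        simp only [decide_eq_false_iff_not, not_le]
        exact hhigh k h (by omega)
    omega
  | succ N ih =>
    intro lo hi hN h0 hlh hhi hlow hhigh
    by_cases h : lo < hi
    · rw [bisectGo, dif_pos h]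
      have hb := PySem.Int.floordiv_two_mid_bounds (le_of_lt h)
      have hltm : PySem.Int.floordiv (lo + hi) 2 < hi :=
        (PySem.Int.floordiv_lt_iff_lt_mul (by norm_num)).2 (by omega)
      set mid := PySem.Int.floordiv (lo + hi) 2 with hmid
      have hmlen : mid.toNat < xs.length := by omega
      have hget : PySem.List.pyGetD xs mid 0 = xs[mid.toNat] := by
        rw [PySem.List.pyGetD_of_nonneg xs 0 (by omega), List.getD_eq_getElem _ _ hmlen]
      show (if x < PySem.List.pyGetD xs mid 0 then bisectGo xs x lo mid
        else bisectGo xs x (mid + 1) hi) = _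
      rw [hget]
      by_cases hx : x < xs[mid.toNat]
      · rw [if_pos hx]
        apply ih lo mid (by omega) h0 (by omega) (by omega) hlow
        intro k hk hmk
        calc x < xs[mid.toNat] := hx
          _ ≤ xs[k] := pairwise_getElem_le xs hs (by omega) hk
      · rw [if_neg hx]
        apply ih (mid + 1) hi (by omega) (by omega) (by omega) hhi
        · intro k hk hkm
          rcases Nat.lt_or_ge k mid.toNat with h' | h'
          · calc xs[k] ≤ xs[mid.toNat] := pairwise_getElem_le xs hs (by omega) hmlen
              _ ≤ x := by omega
          · have : k = mid.toNat := by omega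
            subst this; omega
        · exact hhigh
    · rw [bisectGo, dif_neg h]
      have : lo = hi := by omega
      subst this
      have := ih lo lo (by omega) h0 (by omega) hhi hlow hhigh
      rw [bisectGo, dif_neg (by omega)] at this
      exact this

lemma bisectRightB_eq (xs : List Int) (hs : xs.Pairwise (· ≤ ·)) (x : Int) :
    bisectRightB xs x = (xs.countP (fun s => decide (s ≤ x)) : Int) := by
  apply bisectGo_eq_aux xs hs x xs.length 0 (xs.length : Int) (by omega) (by omega)
    (by omega) (by omega)
  · intro k hk hkn
    omega
  · intro k hk hkn
    omega

lemma pairwise_getD_fst_le (S : List (Int × Int)) (hS : S.Pairwise (fun a b => a.1 ≤ b.1))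
    {i j : Nat} (hij : i ≤ j) (hj : j < S.length) :
    (S.getD i (0,0)).1 ≤ (S.getD j (0,0)).1 := by
  rw [List.getD_eq_getElem _ _ (show i < S.length by omega), List.getD_eq_getElem _ _ hj]
  rcases Nat.lt_or_ge i j with h | h
  · exact List.pairwise_iff_getElem.1 hS i j (by omega) hj h
  · have : i = j := by omega
    subst this; rfl

lemma mem_drop_fst_ge (S : List (Int × Int)) (hS : S.Pairwise (fun a b => a.1 ≤ b.1))
    (k : Nat) (hk : k < S.length) (p : Int × Int) (hp : p ∈ S.drop (k+1)) :
    (S.getD k (0,0)).1 ≤ p.1 := by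
  rcases List.mem_iff_getElem.1 hp with ⟨l, hl, rfl⟩
  rw [List.getElem_drop]
  have hlen : k + 1 + l < S.length := by simp at hl; omega
  rw [List.getD_eq_getElem _ _ hk]
  exact List.pairwise_iff_getElem.1 hS k (k+1+l) hk hlen (by omega)

lemma per_index (S : List (Int × Int)) (hS : S.Pairwise (fun a b => a.1 ≤ b.1))
    (k : Nat) (hk : k < S.length) :
    ((S.drop (k+1)).countP
        (fun p => decide (p.1 ≥ (S.getD k (0,0)).1 ∧ p.1 ≤ (S.getD k (0,0)).2)) : Int)
    = if ((S.countP (fun p => decide (p.1 ≤ (S.getD k (0,0)).2)) : Int) - ((k : Int) + 1)) > 0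
      then ((S.countP (fun p => decide (p.1 ≤ (S.getD k (0,0)).2)) : Int) - ((k : Int) + 1))
      else 0 := by
  set e := (S.getD k (0,0)).2 with he
  set s := (S.getD k (0,0)).1 with hs
  have hcong : (S.drop (k+1)).countP (fun p => decide (p.1 ≥ s ∧ p.1 ≤ e))
      = (S.drop (k+1)).countP (fun p => decide (p.1 ≤ e)) := by
    apply List.countP_congr
    intro p hp
    have := mem_drop_fst_ge S hS k hk p hp
    simp only [decide_eq_true_eq]
    constructor
    · rintro ⟨_, h⟩; exact h
    · intro h; exact ⟨this, h⟩
  rw [hcong]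
  have hsplit : S.countP (fun p => decide (p.1 ≤ e))
      = (S.take (k+1)).countP (fun p => decide (p.1 ≤ e))
        + (S.drop (k+1)).countP (fun p => decide (p.1 ≤ e)) := by
    conv_lhs => rw [← List.take_append_drop (k+1) S]
    exact List.countP_append
  have hlen_take : (S.take (k+1)).length = k + 1 := by
    rw [List.length_take]; omega
  by_cases hc : s ≤ e
  · -- every element of the first k+1 has fst ≤ s ≤ e
    have htake : (S.take (k+1)).countP (fun p => decide (p.1 ≤ e)) = k + 1 := by
      rw [List.countP_eq_length.2, hlen_take]
      intro p hp
      rcases List.mem_iff_getElem.1 hp with ⟨i, hi, rfl⟩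
      have hi' : i < S.length := by simp at hi; omega
      rw [List.getElem_take]
      simp only [decide_eq_true_eq]
      calc S[i].1 = (S.getD i (0,0)).1 := by rw [List.getD_eq_getElem _ _ hi']
        _ ≤ s := pairwise_getD_fst_le S hS (by simp at hi; omega) hk
        _ ≤ e := hc
    rw [hsplit, htake]
    have := List.countP_le_length (p := fun p => decide (p.1 ≤ e)) (l := S.drop (k+1))
    split_ifs with h
    · push_cast; omega
    · push_cast at h ⊢
      omega
  · -- e < s : no element of the drop qualifies, and at most k+1 of the take do
    have hdrop : (S.drop (k+1)).countP (fun p => decide (p.1 ≤ e)) = 0 := by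
      rw [List.countP_eq_zero.2]
      intro p hp
      have := mem_drop_fst_ge S hS k hk p hp
      simp only [decide_eq_true_eq]
      omega
    have htake_le : (S.take (k+1)).countP (fun p => decide (p.1 ≤ e)) ≤ k + 1 := by
      calc _ ≤ (S.take (k+1)).length := List.countP_le_length
        _ = k + 1 := hlen_take
    rw [hsplit, hdrop]
    rw [if_neg (by push_cast; omega)]
    norm_num

lemma core_sum (S : List (Int × Int)) (hS : S.Pairwise (fun a b => a.1 ≤ b.1)) :
    ((List.range (S.length - 1)).map (fun k =>
        ((S.drop (k+1)).countP
          (fun p => decide (p.1 ≥ (S.getD k (0,0)).1 ∧ p.1 ≤ (S.getD k (0,0)).2)) : Int))).sum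
    = ((List.range S.length).map (fun k =>
        if ((S.countP (fun p => decide (p.1 ≤ (S.getD k (0,0)).2)) : Int) - ((k : Int) + 1)) > 0
        then ((S.countP (fun p => decide (p.1 ≤ (S.getD k (0,0)).2)) : Int) - ((k : Int) + 1))
        else 0)).sum := by
  by_cases h0 : S.length = 0
  · rw [List.length_eq_zero_iff.1 h0]; simp
  · have hpos : 1 ≤ S.length := by omega
    have hrange : List.range S.length = List.range (S.length - 1) ++ [S.length - 1] := by
      conv_lhs => rw [show S.length = (S.length - 1) + 1 by omega]
      exact List.range_succ
    rw [hrange, List.map_append, List.sum_append]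
    have hlast :
        (if ((S.countP (fun p => decide (p.1 ≤ (S.getD (S.length-1) (0,0)).2)) : Int)
            - (((S.length - 1 : Nat) : Int) + 1)) > 0
         then ((S.countP (fun p => decide (p.1 ≤ (S.getD (S.length-1) (0,0)).2)) : Int)
            - (((S.length - 1 : Nat) : Int) + 1))
         else 0) = 0 := by
      have := List.countP_le_length (p := fun p => decide (p.1 ≤ (S.getD (S.length-1) (0,0)).2)) (l := S)
      rw [if_neg]
      omega
    rw [List.map_cons, List.map_nil, List.sum_cons, List.sum_nil, hlast, add_zero, add_zero]
    rw [List.map_congr_left (fun k hk => per_index S hS k (by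
      have := List.mem_range.1 hk; omega))]

lemma A_normal (S : List (Int × Int)) :
    (PySem.List.pyRange 0 ((S.length : Int) - 1)).foldl (fun acc i =>
      (PySem.List.pyRange (i + 1) (S.length : Int)).foldl (fun acc2 j =>
        acc2 + checkIntersection (PySem.List.pyGetD S i (0, 0)) (PySem.List.pyGetD S j (0, 0))) acc) 0
    = ((List.range (S.length - 1)).map (fun k =>
        ((S.drop (k+1)).countP
          (fun p => decide (p.1 ≥ (S.getD k (0,0)).1 ∧ p.1 ≤ (S.getD k (0,0)).2)) : Int))).sum := by
  rw [PySem.List.foldl_congr_mem _ _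
      (fun acc i => acc + ((PySem.List.pyRange (i + 1) (S.length : Int)).map (fun j =>
        checkIntersection (PySem.List.pyGetD S i (0, 0)) (PySem.List.pyGetD S j (0, 0)))).sum) _
      (fun acc i _ => PySem.List.foldl_add _ _ _)]
  rw [PySem.List.foldl_add, zero_add]
  rw [pyRange_one_eq 0 ((S.length : Int) - 1), List.map_map]
  have hn : ((S.length : Int) - 1 - 0).toNat = S.length - 1 := by omega
  rw [hn]
  refine congrArg List.sum (List.map_congr_left ?_)
  intro k hk
  have hk' : k < S.length - 1 := List.mem_range.1 hk
  simp only [Function.comp_apply, zero_add]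
  rw [pyRange_one_eq ((k : Int) + 1) (S.length : Int), List.map_map]
  have hm : ((S.length : Int) - ((k : Int) + 1)).toNat = S.length - (k + 1) := by omega
  rw [hm]
  have hcast : ∀ l : Nat, ((k : Int) + 1 + (l : Int)) = ((k + 1 + l : Nat) : Int) := by
    intro l; push_cast; ring
  simp only [Function.comp_def, hcast, PySem.List.pyGetD_natCast]
  rw [drop_eq_map_range S (0,0) (k+1), List.countP_map]
  rw [show (List.range (S.length - (k+1))).map
        (fun l => checkIntersection (S.getD k (0,0)) (S.getD (k+1+l) (0,0)))
      = (List.range (S.length - (k+1))).map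
        (fun l => if ((S.getD (k+1+l) (0,0)).1 ≥ (S.getD k (0,0)).1
              ∧ (S.getD (k+1+l) (0,0)).1 ≤ (S.getD k (0,0)).2) then (1:Int) else 0) from
    List.map_congr_left (fun l _ => rfl)]
  rw [sum_map_ite_prop]
  rfl

lemma B_normal (S : List (Int × Int)) (hS : S.Pairwise (fun a b => a.1 ≤ b.1)) :
    (PySem.List.pyRange 0 (S.length : Int)).foldl (fun total i =>
      let c := bisectRightB (S.map (fun p => p.1)) (PySem.List.pyGetD S i (0, 0)).2 - (i + 1)
      if c > 0 then total + c else total) 0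
    = ((List.range S.length).map (fun k =>
        if ((S.countP (fun p => decide (p.1 ≤ (S.getD k (0,0)).2)) : Int) - ((k : Int) + 1)) > 0
        then ((S.countP (fun p => decide (p.1 ≤ (S.getD k (0,0)).2)) : Int) - ((k : Int) + 1))
        else 0)).sum := by
  have hstarts : (S.map (fun p => p.1)).Pairwise (· ≤ ·) := by
    rw [List.pairwise_map]; exact hS
  rw [PySem.List.foldl_congr_mem _ _
      (fun total i => total +
        (if (bisectRightB (S.map (fun p => p.1)) (PySem.List.pyGetD S i (0, 0)).2 - (i + 1)) > 0
         then (bisectRightB (S.map (fun p => p.1)) (PySem.List.pyGetD S i (0, 0)).2 - (i + 1))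
         else 0)) _
      (fun total i _ => by
        show (let c := bisectRightB (S.map (fun p => p.1)) (PySem.List.pyGetD S i (0, 0)).2 - (i + 1)
              if c > 0 then total + c else total) = _
        simp only []
        split_ifs <;> omega)]
  rw [PySem.List.foldl_add, zero_add, PySem.List.pyRange_zero_natCast, List.map_map]
  refine congrArg List.sum (List.map_congr_left ?_)
  intro k hk
  have hk' : k < S.length := List.mem_range.1 hk
  simp only [Function.comp_apply, PySem.List.pyGetD_natCast]
  rw [bisectRightB_eq _ hstarts, List.countP_map]
  rfl

-- the common interval list both programs build before sorting
def mkIv (array : List Int) : List (Int × Int) :=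
  (List.range array.length).map
    (fun k : Nat => ((k : Int) - array.getD k 0, (k : Int) + array.getD k 0))

lemma tupleA_eq (array : List Int) :
    (PySem.List.pyRange 0 (array.length : Int)).foldl
      (fun acc i => acc ++ [(i - PySem.List.pyGetD array i 0, i + PySem.List.pyGetD array i 0)]) []
    = mkIv array := by
  rw [PySem.List.foldl_append_singleton_eq_map, List.nil_append,
    PySem.List.pyRange_zero_natCast, List.map_map]
  refine List.map_congr_left ?_
  intro k _
  simp only [Function.comp_apply, PySem.List.pyGetD_natCast]

lemma ivalsB_eq (array : List Int) :
    (PySem.List.enumerate array).map (fun p => (p.1 - p.2, p.1 + p.2)) = mkIv array := by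
  rw [show PySem.List.enumerate array = PySem.List.enumerate array 0 from rfl,
    enumerate_eq (0 : Int) array 0, List.map_map]
  refine List.map_congr_left ?_
  intro k _
  simp

lemma solution_eq_alt (array : List Int) : solution array = solution_alt array := by
  simp only [solution, solution_alt]
  rw [tupleA_eq, ivalsB_eq]
  have hS := sorted2_pairwise_fst (mkIv array)
  rw [A_normal, B_normal _ hS, core_sum _ hS]

-- ===== VERDICT (by name: the statement is the Claim_ definition above) =====
theorem solution_spec : Claim_equal_solution := by
  intro array _
  unfold Spec_solution
  exact solution_eq_alt array
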